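-- pv_equiv track=rewrite | github.com/ewbing/inat_species | inat_species_data.py | get_month_with_most_obs
-- ===== SOURCE A (Python) =====
-- def get_month_with_most_obs(histogram):
--     """Return the month with the most observations based on histogram data."""
--     # Month numbers are 1-indexed (1=January)
--     months = [
--         "January",
--         "February",
--         "March",
--         "April",
--         "May",
--         "June",
--         "July",
--         "August",
--         "September",
--         "October",
--         "November",
--         "December",
--     ]
--
--     # Find max month (histogram is 0-indexed)
--     if not histogram or all(val == 0 for val in histogram):
--         return "No data"
--
--     max_month_index = histogram.index(max(histogram))
--     return months[max_month_index]
-- ===== SOURCE B (Python) =====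
-- def get_month_with_most_obs(histogram):
--     """Return the month with the most observations based on histogram data."""
--     months = [
--         "January", "February", "March", "April", "May", "June",
--         "July", "August", "September", "October", "November", "December",
--     ]
--     # Single pass: track the first index of the running maximum and whether
--     # any nonzero value was seen, instead of separate all()/max()/index() scans.
--     best_i = -1
--     best_v = 0
--     saw_nonzero = False
--     for i, v in enumerate(histogram):
--         if best_i < 0 or v > best_v:
--             best_i = i
--             best_v = v
--         if v != 0:
--             saw_nonzero = True
--     if best_i < 0 or not saw_nonzero:
--         return "No data"
--     return months[best_i]
-- ===== Notes on version B (the rewrite author's own statement) =====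
-- stated objective: alternative
-- what changed: Replaced A's three separate scans (all()-zero check, max(), list.index()) with one explicit loop that maintains the best index, best value and a saw-nonzero flag.
import Mathlib
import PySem

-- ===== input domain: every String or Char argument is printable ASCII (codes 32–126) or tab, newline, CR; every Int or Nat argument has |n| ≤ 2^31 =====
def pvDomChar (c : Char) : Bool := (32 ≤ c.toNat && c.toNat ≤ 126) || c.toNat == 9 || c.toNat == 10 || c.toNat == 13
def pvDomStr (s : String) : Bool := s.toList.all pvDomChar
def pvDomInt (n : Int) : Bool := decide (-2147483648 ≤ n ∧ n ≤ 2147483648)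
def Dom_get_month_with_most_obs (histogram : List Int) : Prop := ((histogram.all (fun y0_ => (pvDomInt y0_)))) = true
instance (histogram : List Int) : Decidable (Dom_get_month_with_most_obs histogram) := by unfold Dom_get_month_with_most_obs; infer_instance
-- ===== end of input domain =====

-- B replaces A's three scans (all()-zero check, max(), list.index()) by ONE explicit loop
-- maintaining best index / best value / a nonzero flag (objective: alternative, same O(n) cost).

-- ===== PORT A =====
def get_month_with_most_obs (histogram : List Int) : String :=
  let months := ["January", "February", "March", "April", "May", "June",
                 "July", "August", "September", "October", "November", "December"]
  if histogram.isEmpty || histogram.all (fun val => val == 0) then "No data"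
  else
    match PySem.List.max? histogram (fun y => y) with   -- max(histogram); none = ValueError (unreachable: guard above)
    | none => "No data"
    | some m =>
      match PySem.List.index? histogram m with          -- histogram.index(max(...)); none = ValueError (unreachable: m ∈ histogram)
      | none => "No data"
      | some i => (PySem.List.pyGet? months (i : Int)).getD ""  -- months[i]; none = IndexError, excluded by Pre_

-- ===== PORT B =====
-- the for-loop of Source B: state (best_i, best_v, saw_nonzero), i = next enumerate index
def altLoop : List Int → Int → Int → Int → Bool → Int × Int × Bool
  | [], _, bi, bv, saw => (bi, bv, saw)
  | v :: rest, i, bi, bv, saw =>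
      if bi < 0 || bv < v then altLoop rest (i + 1) i v (saw || v != 0)
      else altLoop rest (i + 1) bi bv (saw || v != 0)

def get_month_with_most_obs_alt (histogram : List Int) : String :=
  let months := ["January", "February", "March", "April", "May", "June",
                 "July", "August", "September", "October", "November", "December"]
  let p := altLoop histogram 0 (-1) 0 false
  if p.1 < 0 || !p.2.2 then "No data"
  else (PySem.List.pyGet? months p.1).getD ""           -- months[best_i]; none = IndexError, excluded by Pre_

-- ===== PRECONDITION & SPEC =====
-- Pre_ excludes exactly the inputs on which Python A raises IndexError (months[i] with the
-- first index of the maximum ≥ 12); Python B raises there too. A returns on everything else.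
def Pre_get_month_with_most_obs (histogram : List Int) : Prop :=
  histogram = [] ∨ (∀ v ∈ histogram, v = 0) ∨
    ∃ v ∈ histogram.take 12, ∀ w ∈ histogram, w ≤ v

instance (histogram : List Int) : Decidable (Pre_get_month_with_most_obs histogram) := by
  unfold Pre_get_month_with_most_obs; infer_instance

def pvWitness_get_month_with_most_obs : List Int := [3, 1, 2]

def Spec_get_month_with_most_obs (histogram : List Int) (out : String) : Prop :=
  out = get_month_with_most_obs_alt histogram
instance (histogram : List Int) (out : String) : Decidable (Spec_get_month_with_most_obs histogram out) := by
  unfold Spec_get_month_with_most_obs; infer_instance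

-- ===== CLAIM (what is proved, stated in full; the proofs are below) =====
def Claim_equal_get_month_with_most_obs : Prop := ∀ (histogram : List Int), Dom_get_month_with_most_obs histogram → Pre_get_month_with_most_obs histogram → Spec_get_month_with_most_obs histogram (get_month_with_most_obs histogram)

-- ===== LEMMAS AND PROOFS =====

-- the loop invariant: once best_i is set (value x recorded at index 0 ≤ j), the loop returns
-- the running max, the index of its first attainment, and the accumulated nonzero flag
lemma altLoop_spec (t : List Int) : ∀ (i j x : Int) (saw : Bool), 0 ≤ i → 0 ≤ j →
    altLoop t i j x saw =
      ((if t.foldl max x = x then j else i + (t.idxOf (t.foldl max x) : Int)),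
       t.foldl max x,
       saw || t.any (fun v => v != 0)) := by
  induction t with
  | nil => intro i j x saw _ _; simp [altLoop]
  | cons v t ih =>
    intro i j x saw hi hj
    simp only [altLoop, List.foldl_cons, List.any_cons]
    by_cases hv : x < v
    · have hle : v ≤ List.foldl max v t := (PySem.List.le_foldl_max t v).1
      have hmax : max x v = v := max_eq_right (le_of_lt hv)
      have hne : ¬ List.foldl max v t = x := by intro hh; omega
      rw [if_pos (by simp [hv]), ih (i + 1) i v (saw || v != 0) (by omega) hi, hmax]
      have hvx : ¬ v = x := by omega
      by_cases hm : List.foldl max v t = v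
      · simp [hm, hvx, Bool.or_assoc]
      · have hnv : ¬ v = List.foldl max v t := fun h => hm h.symm
        simp only [hm, hne, if_false, List.idxOf_cons, beq_iff_eq, hnv, Bool.or_assoc,
          Bool.cond_eq_ite, Prod.mk.injEq, and_true]
        push_cast
        omega
    · have hj' : ¬ j < 0 := not_lt.mpr hj
      have hmax : max x v = x := max_eq_left (not_lt.mp hv)
      rw [if_neg (by simp [hj', hv]), ih (i + 1) j x (saw || v != 0) (by omega) hj, hmax]
      by_cases hm : List.foldl max x t = x
      · simp [hm, Bool.or_assoc]
      · have hle : x ≤ List.foldl max x t := (PySem.List.le_foldl_max t x).1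
        have hnv : ¬ v = List.foldl max x t := by intro hh; omega
        simp only [hm, if_false, List.idxOf_cons, beq_iff_eq, hnv, Bool.or_assoc,
          Bool.cond_eq_ite, Prod.mk.injEq, and_true]
        push_cast
        omega

lemma all_zero_eq_not_any (l : List Int) :
    (l.all (fun v => v == 0)) = !(l.any (fun v => v != 0)) := by
  induction l with
  | nil => rfl
  | cons x t ih => simp [List.all_cons, List.any_cons, ih, Bool.not_or, bne]

lemma idxOf?_of_mem (v : Int) (l : List Int) (h : v ∈ l) :
    List.idxOf? v l = some (l.idxOf v) := by
  induction l with
  | nil => cases h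
  | cons x t ih =>
    by_cases hx : x = v
    · simp [List.idxOf?_cons, hx]
    · have hm : v ∈ t := by
        cases List.mem_cons.mp h with
        | inl h' => exact absurd h'.symm hx
        | inr h' => exact h'
      simp [List.idxOf?_cons, hx, ih hm]

lemma main_eq (histogram : List Int) :
    get_month_with_most_obs histogram = get_month_with_most_obs_alt histogram := by
  cases histogram with
  | nil => rfl
  | cons x t =>
    have hstep : get_month_with_most_obs_alt (x :: t) =
        (let p := altLoop t 1 0 x (false || x != 0)
         let months := ["January", "February", "March", "April", "May", "June",
                        "July", "August", "September", "October", "November", "December"]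
         if p.1 < 0 || !p.2.2 then "No data"
         else (PySem.List.pyGet? months p.1).getD "") := by
      simp [get_month_with_most_obs_alt, altLoop]
    rw [hstep, altLoop_spec t 1 0 x (false || x != 0) (by omega) (by omega)]
    simp only [Bool.false_or]
    by_cases hallz : ((x :: t).all (fun v => v == 0)) = true
    · have hany : ((x :: t).any (fun v => v != 0)) = false := by
        have h := all_zero_eq_not_any (x :: t)
        rw [hallz] at h
        exact (Bool.not_eq_true' _).mp h.symm
      simp only [List.any_cons] at hany
      simp [get_month_with_most_obs, hallz, hany]
    · have hany : ((x :: t).any (fun v => v != 0)) = true := by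
        cases hA : ((x :: t).any (fun v => v != 0)) with
        | true => rfl
        | false =>
          exfalso; apply hallz
          rw [all_zero_eq_not_any, hA]; rfl
      simp only [List.any_cons] at hany
      have hallz' : ((x :: t).all (fun v => v == 0)) = false :=
        Bool.eq_false_iff.mpr hallz
      have hm : PySem.List.max? (x :: t) (fun y => y) = some (List.foldl max x t) :=
        PySem.List.max?_id_cons x t
      have hmem : List.foldl max x t ∈ x :: t := PySem.List.max?_mem hm
      have hcast : (((x :: t).idxOf (List.foldl max x t) : Nat) : Int)
          = (if List.foldl max x t = x then (0 : Int)
             else 1 + (t.idxOf (List.foldl max x t) : Int)) := by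
        by_cases hfx : List.foldl max x t = x
        · simp [hfx]
        · have hnx : ¬ x = List.foldl max x t := fun h => hfx h.symm
          simp only [List.idxOf_cons, beq_iff_eq, hnx, hfx, if_false, Bool.cond_eq_ite]
          push_cast; omega
      have hk : (decide ((((x :: t).idxOf (List.foldl max x t) : Nat) : Int) < 0)) = false :=
        decide_eq_false (not_lt.mpr (Int.natCast_nonneg _))
      simp only [get_month_with_most_obs, List.isEmpty_cons, hallz',
        hm, hany, Bool.not_true, Bool.or_false, ← hcast, PySem.List.pyGet?_natCast, hk]
      rw [PySem.List.index?_eq_idxOf?, idxOf?_of_mem _ _ hmem]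

-- ===== VERDICT (by name: the statement is the Claim_ definition above) =====
theorem get_month_with_most_obs_spec : Claim_equal_get_month_with_most_obs := by
  intro h _ _; exact main_eq h
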